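-- pv_equiv track=rewrite | github.com/PythonToGo/AoC_python | day3/script.py | max_joltage_for_bank
-- ===== SOURCE A (Python) =====
-- def max_joltage_for_bank(line: str) -> int:
--     digits =[int(c) for c in line.strip()]
--     n = len(digits)
--
--     # less than 2 digits
--     if n < 2:
--         return 0
--
--     # suffix_max[i] = i or more digits suffix max
--     suffix_max = [0] * n
--     suffix_max[-1] = digits[-1]
--     for i in range(n-2, -1, -1):
--         suffix_max[i] = max(digits[i], suffix_max[i+1])
--
--     best = -1
--
--     for i in range(n-1):
--         cand = 10 * digits[i] + suffix_max[i+1]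
--         if cand > best:
--             best = cand
--
--     return best
-- ===== SOURCE B (Python) =====
-- def max_joltage_for_bank(line: str) -> int:
--     digits = [int(c) for c in line.strip()]
--     n = len(digits)
--     if n < 2:
--         return 0
--     best = -1
--     running = digits[-1]
--     for i in range(n - 2, -1, -1):
--         d = digits[i]
--         cand = 10 * d + running
--         if cand > best:
--             best = cand
--         if d > running:
--             running = d
--     return best
-- ===== Notes on version B (the rewrite author's own statement) =====
-- stated objective: simpler
-- what changed: Single backward pass keeping a scalar running suffix-maximum instead of precomputing a suffix_max array and then scanning forward.
import Mathlib
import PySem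

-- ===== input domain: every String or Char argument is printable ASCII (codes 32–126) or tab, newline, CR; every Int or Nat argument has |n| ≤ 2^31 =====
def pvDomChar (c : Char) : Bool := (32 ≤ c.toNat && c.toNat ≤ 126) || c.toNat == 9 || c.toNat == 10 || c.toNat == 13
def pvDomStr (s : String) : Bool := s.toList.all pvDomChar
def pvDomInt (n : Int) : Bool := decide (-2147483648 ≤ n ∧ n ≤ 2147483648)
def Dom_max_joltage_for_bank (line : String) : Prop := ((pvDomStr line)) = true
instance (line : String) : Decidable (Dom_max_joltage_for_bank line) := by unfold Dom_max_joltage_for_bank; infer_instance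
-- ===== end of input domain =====

-- B replaces A's precomputed suffix_max array + forward scan by one backward pass
-- keeping a scalar running suffix-maximum (simpler, O(1) extra space).


-- ===== PORT A =====
-- int(c) on a single ASCII digit char is c.toNat - 48; exact inside Pre_ (digit chars only).
def pvDigits (line : String) : List Int :=
  (PySem.Str.strip line).toList.map (fun c => ((c.toNat : Int) - 48))

-- A's backward-filling loop 'suffix_max[i] = max(digits[i], suffix_max[i+1])' as the
-- obvious structural recursion building the same list from the right.
def pvSufMax : List Int → List Int
  | [] => []
  | [d] => [d]
  | d :: t =>
      let s := pvSufMax t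
      (if d > s.headD 0 then d else s.headD 0) :: s

def max_joltage_for_bank (line : String) : Int :=
  let digits := pvDigits line
  let n : Int := digits.length
  if n < 2 then 0
  else
    let suffix_max := pvSufMax digits
    (PySem.List.pyRange 0 (n - 1) 1).foldl
      (fun best i =>
        let cand := 10 * PySem.List.pyGetD digits i 0 + PySem.List.pyGetD suffix_max (i + 1) 0
        if cand > best then cand else best)
      (-1)

-- ===== PORT B =====
-- Source B's single backward loop (i from n-2 down to 0) over digits[:-1], carrying
-- the pair (best, running); a foldr processes those elements right-to-left.
def max_joltage_for_bank_alt (line : String) : Int :=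
  let digits := pvDigits line
  let n : Int := digits.length
  if n < 2 then 0
  else
    (digits.dropLast.foldr
      (fun d (st : Int × Int) =>
        let cand := 10 * d + st.2
        ((if cand > st.1 then cand else st.1), (if d > st.2 then d else st.2)))
      (-1, digits.getLastD 0)).1

-- ===== PRECONDITION & SPEC =====
-- Pre_ excludes exactly the inputs where int(c) raises ValueError: some stripped char is not a digit.
def Pre_max_joltage_for_bank (line : String) : Prop :=
  ((PySem.Str.strip line).toList.all PySem.Chars.isdigit) = true
instance (line : String) : Decidable (Pre_max_joltage_for_bank line) := by
  unfold Pre_max_joltage_for_bank; infer_instance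
def pvWitness_max_joltage_for_bank : String := "234"
def Spec_max_joltage_for_bank (line : String) (out : Int) : Prop := out = max_joltage_for_bank_alt line
instance (line : String) (out : Int) : Decidable (Spec_max_joltage_for_bank line out) := by unfold Spec_max_joltage_for_bank; infer_instance

-- ===== CLAIM (what is proved, stated in full; the proofs are below) =====
def Claim_equal_max_joltage_for_bank : Prop := ∀ (line : String), Dom_max_joltage_for_bank line → Pre_max_joltage_for_bank line → Spec_max_joltage_for_bank line (max_joltage_for_bank line)

-- ===== LEMMAS AND PROOFS =====

theorem max_joltage_for_bank_witness_ok :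
    Dom_max_joltage_for_bank pvWitness_max_joltage_for_bank ∧
    Pre_max_joltage_for_bank pvWitness_max_joltage_for_bank := by decide

-- Python's 'if c > b then c else b' update IS the max
theorem pvIfMax (b c : Int) : (if c > b then c else b) = max b c := by
  rw [max_def]; split_ifs <;> omega

-- max of t ++ [l]
def pvM (t : List Int) (l : Int) : Int := t.foldr max l

-- the list of candidates 10*d_i + (suffix max after i), for digits = ds ++ [l]
def pvCands : List Int → Int → List Int
  | [], _ => []
  | d :: t, l => (10 * d + pvM t l) :: pvCands t l

theorem pvSufMax_append_ne_nil (t : List Int) (l : Int) : pvSufMax (t ++ [l]) ≠ [] := by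
  cases t with
  | nil => simp [pvSufMax]
  | cons a t => cases t <;> simp [pvSufMax]

theorem pvAppend_cons (t : List Int) (l : Int) : ∃ a r, t ++ [l] = a :: r := by
  cases t <;> exact ⟨_, _, rfl⟩

theorem pvSufMax_head (t : List Int) (l : Int) :
    (pvSufMax (t ++ [l])).headD 0 = pvM t l := by
  induction t with
  | nil => simp [pvSufMax, pvM]
  | cons d t ih =>
      obtain ⟨a, r, hlist⟩ := pvAppend_cons t l
      rw [List.cons_append, hlist]
      simp only [pvSufMax, List.headD_cons]
      rw [← hlist, ih, pvIfMax]
      simp [pvM, max_comm]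

theorem pvSufMax_cons_append (d : Int) (t : List Int) (l : Int) :
    pvSufMax (d :: (t ++ [l])) =
      (if d > pvM t l then d else pvM t l) :: pvSufMax (t ++ [l]) := by
  obtain ⟨a, r, hlist⟩ := pvAppend_cons t l
  rw [hlist]
  simp only [pvSufMax]
  rw [← hlist, pvSufMax_head]

-- zipping digits with the tail of the suffix-max list yields exactly pvCands
theorem pvZip_eq_cands (ds : List Int) (l : Int) :
    List.zipWith (fun d s => 10 * d + s) (ds ++ [l]) (pvSufMax (ds ++ [l])).tail
      = pvCands ds l := by
  induction ds with
  | nil => simp [pvSufMax, pvCands]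
  | cons d t ih =>
      rw [List.cons_append, pvSufMax_cons_append, List.tail_cons]
      obtain ⟨a, r, h⟩ : ∃ a r, pvSufMax (t ++ [l]) = a :: r := by
        cases hh : pvSufMax (t ++ [l]) with
        | nil => exact absurd hh (pvSufMax_append_ne_nil t l)
        | cons a r => exact ⟨a, r, rfl⟩
      have ha : a = pvM t l := by
        have := pvSufMax_head t l; rw [h] at this; simpa using this
      have hr : r = (pvSufMax (t ++ [l])).tail := by rw [h]; rfl
      rw [h, List.zipWith_cons_cons, ha, hr, ih]
      rfl

-- length of the suffix-max list
theorem pvSufMax_length (xs : List Int) : (pvSufMax xs).length = xs.length := by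
  induction xs with
  | nil => rfl
  | cons d t ih => cases t <;> simp_all [pvSufMax]

theorem pvCands_length (ds : List Int) (l : Int) : (pvCands ds l).length = ds.length := by
  induction ds with
  | nil => rfl
  | cons d t ih => simp [pvCands, ih]

-- A's forward fold over indices equals a foldl over the candidate list
theorem pvA_fold_eq (ds : List Int) (l : Int) :
    (PySem.List.pyRange 0 ((((ds ++ [l]).length : Int)) - 1) 1).foldl
      (fun best i =>
        let cand := 10 * PySem.List.pyGetD (ds ++ [l]) i 0
                      + PySem.List.pyGetD (pvSufMax (ds ++ [l])) (i + 1) 0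
        if cand > best then cand else best)
      (-1)
    = (pvCands ds l).foldl (fun best cand => if cand > best then cand else best) (-1) := by
  have hlen : (((ds ++ [l]).length : Int)) - 1 = ((pvCands ds l).length : Int) := by
    simp [pvCands_length]
  rw [hlen]
  have hcongr :
      (PySem.List.pyRange 0 ((pvCands ds l).length : Int) 1).foldl
        (fun best i =>
          let cand := 10 * PySem.List.pyGetD (ds ++ [l]) i 0
                        + PySem.List.pyGetD (pvSufMax (ds ++ [l])) (i + 1) 0
          if cand > best then cand else best)
        (-1)
      = (PySem.List.pyRange 0 ((pvCands ds l).length : Int) 1).foldl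
          (fun best i =>
            (fun best cand => if cand > best then cand else best) best
              (PySem.List.pyGetD (pvCands ds l) i 0))
          (-1) := by
    apply PySem.List.foldl_congr_mem
    intro best i hi
    rw [PySem.List.mem_pyRange_one] at hi
    obtain ⟨h0, hlt⟩ := hi
    obtain ⟨k, rfl⟩ : ∃ k : Nat, i = (k : Int) := ⟨i.toNat, (Int.toNat_of_nonneg h0).symm⟩
    have hk : k < (pvCands ds l).length := by exact_mod_cast hlt
    have hk' : k < ds.length := by rwa [pvCands_length] at hk
    have hk1 : k < (ds ++ [l]).length := by simp; omega
    have hk2 : k + 1 < (pvSufMax (ds ++ [l])).length := by rw [pvSufMax_length]; simp; omega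
    have h1 : PySem.List.pyGetD (ds ++ [l]) (k : Int) 0 = (ds ++ [l])[k]'hk1 := by
      rw [PySem.List.pyGetD_natCast, List.getD_eq_getElem?_getD, List.getElem?_eq_getElem hk1]
      rfl
    have h2 : PySem.List.pyGetD (pvSufMax (ds ++ [l])) ((k : Int) + 1) 0
        = (pvSufMax (ds ++ [l]))[k + 1]'hk2 := by
      rw [show ((k : Int) + 1) = ((k + 1 : Nat) : Int) by push_cast; ring]
      rw [PySem.List.pyGetD_natCast, List.getD_eq_getElem?_getD, List.getElem?_eq_getElem hk2]
      rfl
    have h3 : PySem.List.pyGetD (pvCands ds l) (k : Int) 0 = (pvCands ds l)[k]'hk := by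
      rw [PySem.List.pyGetD_natCast, List.getD_eq_getElem?_getD, List.getElem?_eq_getElem hk]
      rfl
    have hz : (pvCands ds l)[k]'hk = 10 * (ds ++ [l])[k]'hk1 + (pvSufMax (ds ++ [l]))[k + 1]'hk2 := by
      rw [List.getElem_of_eq (pvZip_eq_cands ds l).symm hk, List.getElem_zipWith]
      congr 1
      rw [List.getElem_tail]
    simp only [h1, h2, h3, hz]
  rw [hcongr]
  exact PySem.List.foldl_pyRange_zero_pyGetD' (pvCands ds l) 0
    (fun best cand => if cand > best then cand else best) (-1)

theorem pvFoldIf_eq_max (cs : List Int) (b : Int) :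
    cs.foldl (fun best cand => if cand > best then cand else best) b = cs.foldl max b := by
  induction cs generalizing b with
  | nil => rfl
  | cons c t _ => simp only [List.foldl_cons, pvIfMax]

theorem pvFoldr_max_init (r : List Int) (b c : Int) :
    r.foldr (fun c acc => max acc c) (max b c)
      = max (r.foldr (fun c acc => max acc c) b) c := by
  induction r with
  | nil => rfl
  | cons d t ih => rw [List.foldr_cons, List.foldr_cons, ih, max_right_comm]

-- foldl of max equals the right fold B performs
theorem pvFoldl_max_eq_foldr (l : List Int) (b : Int) :
    l.foldl max b = l.foldr (fun c acc => max acc c) b := by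
  induction l generalizing b with
  | nil => rfl
  | cons c t ih => rw [List.foldl_cons, ih, List.foldr_cons, pvFoldr_max_init]

-- B's fold computes (foldr over candidates, running suffix max)
theorem pvB_fold_eq (ds : List Int) (l : Int) :
    ds.foldr
      (fun d (st : Int × Int) =>
        let cand := 10 * d + st.2
        ((if cand > st.1 then cand else st.1), (if d > st.2 then d else st.2)))
      (-1, l)
    = ((pvCands ds l).foldr (fun c acc => max acc c) (-1), pvM ds l) := by
  induction ds with
  | nil => simp [pvCands, pvM]
  | cons d t ih =>
      rw [List.foldr_cons, ih]
      simp only [pvCands, pvM, List.foldr_cons, Prod.mk.injEq]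
      exact ⟨pvIfMax _ _, by rw [pvIfMax, max_comm]⟩

-- the two ports agree on every input string (the claim carries Pre_ because
-- the Python A raises ValueError outside it)
theorem pv_core (line : String) :
    max_joltage_for_bank line = max_joltage_for_bank_alt line := by
  unfold max_joltage_for_bank max_joltage_for_bank_alt
  generalize pvDigits line = digits
  by_cases h : (digits.length : Int) < 2
  · simp only [if_pos h]
  · simp only [if_neg h]
    have hne : digits ≠ [] := by
      intro hnil; rw [hnil] at h; simp at h
    obtain ⟨ds, l, hds⟩ : ∃ ds l, digits = ds ++ [l] :=
      ⟨digits.dropLast, digits.getLast hne, (List.dropLast_concat_getLast hne).symm⟩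
    subst hds
    rw [List.dropLast_concat, List.getLastD_concat]
    rw [pvA_fold_eq ds l]
    rw [pvB_fold_eq ds l]
    rw [pvFoldIf_eq_max, pvFoldl_max_eq_foldr]

-- ===== VERDICT (by name: the statement is the Claim_ definition above) =====
theorem max_joltage_for_bank_spec : Claim_equal_max_joltage_for_bank := by
  unfold Claim_equal_max_joltage_for_bank Spec_max_joltage_for_bank
  exact fun line _ _ => pv_core line
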